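-- pv_equiv track=rewrite | github.com/vanitaar/bioinformatics_begnn | mod1.py | FrequentWords
-- ===== SOURCE A (Python) =====
-- Text = "ATCAATGATCAACGTAAGCTTCTAAGCATGATCAAGGTGCTCACACAGTTTATCCACAACCTGAGTGGATGACATCAAGATAGGTCGTTGTATCTCCTTCCTCTCGTACTCTCATGACCACGGAAAGATGATCAAGAGAGGATGATTTCTTGGCCATATCGCAATGAATACTTGTGACTTGTGCTTCCAATTGACATCTTCAGCGCCATATTGCGCTGGCCAAGGTGACGGAGCGGGATTACGAAAGCATGATCATGGCTGTTGTTCTGTTTATCTTGTTTTGACTGAGACTTGTTAGGATAGACGGTTTTTCATCACTGACTAGCCAAAGCCTTACTCTGCCTGACATCGACCGTAAATTGATAATGAATTTACATGCTTCCGCGACGATTTACCTCTTGATCATCGATCCGATTGAAGATCTTCAATTGTTAATTCTCTTGCCTCGACTCATAGCCATGATGAGCTCTTGATCATGTTTCCTTAACCCTCTATTTTTTACGGAAGAATGATCAAGCTGCTGCTCTTGATCATCGTTTC"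
--
-- Pattern = "TGATCA"
--
-- def FrequencyMap(Text, k):
--     freq = {}
--     n = len(Text)
--     for i in range(n-k+1):
--         Pattern = Text[i:i+k]
--         freq[Pattern] = 0 #adding new key
--     # add another for loop here to range over each k-mer Pattern of text and increase freq[Pattern] by 1 each time
--     for i in range(n-k+1):
--         Pattern = Text[i:i+k] #defining the variable
--         freq[Pattern] += 1
--     return freq
--
-- def FrequentWords(Text, k):
--     words = []
--     freq = FrequencyMap(Text, k)
--     m = max(freq.values())
--     for key in freq:
--       # add each key to words whose corresponding frequency value is equal to m
--         if freq[key] == m: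
--             words.append(key)
--     return sorted(words)
--
-- k = 3
-- ===== SOURCE B (Python) =====
-- def FrequentWords(Text, k):
--     kmers = sorted(Text[i:i+k] for i in range(len(Text) - k + 1))
--     best = 0
--     winners = []
--     rest = kmers
--     while rest:
--         head = rest[0]
--         run = 1
--         while run < len(rest) and rest[run] == head:
--             run += 1
--         if run > best:
--             best = run
--             winners = [head]
--         elif run == best:
--             winners.append(head)
--         rest = rest[run:]
--     return winners
-- ===== Notes on version B (the rewrite author's own statement) =====
-- stated objective: alternative
-- what changed: Replaces the dict-based two-pass frequency map with sort-then-scan: all k-mers are sorted once and a single linear scan over the sorted list measures each run of equal k-mers, keeping the heads of maximal runs, which come out already in sorted order so no final sort or dict is needed.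
import Mathlib
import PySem

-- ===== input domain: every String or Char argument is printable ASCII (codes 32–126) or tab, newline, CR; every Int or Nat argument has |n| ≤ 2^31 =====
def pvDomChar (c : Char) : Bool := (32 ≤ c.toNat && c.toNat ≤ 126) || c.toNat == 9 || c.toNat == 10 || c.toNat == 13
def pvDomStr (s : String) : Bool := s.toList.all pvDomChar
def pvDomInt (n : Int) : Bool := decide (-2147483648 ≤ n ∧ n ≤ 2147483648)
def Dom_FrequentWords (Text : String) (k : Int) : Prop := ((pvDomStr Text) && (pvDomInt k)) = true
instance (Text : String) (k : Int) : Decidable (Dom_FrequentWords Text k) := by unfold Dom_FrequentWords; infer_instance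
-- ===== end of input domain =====

-- B replaces the dict-based two-pass frequency map with sort-then-scan over the k-mer list (alternative algorithm, not claimed faster).

-- ===== PORT A =====
-- FrequencyMap: two loops over range(n-k+1); dict insert then freq[Pattern] += 1
-- (the key is always present at the += 1, so Dict.modify with default 0 is exact).
def pvFrequencyMap (Text : String) (k : Int) : PySem.Dict String Int :=
  let n : Int := PySem.Str.len Text
  let freq : PySem.Dict String Int :=
    (PySem.List.pyRange 0 (n - k + 1) 1).foldl
      (fun freq i => freq.insert (PySem.Str.slice Text (some i) (some (i + k))) 0)
      PySem.Dict.empty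
  (PySem.List.pyRange 0 (n - k + 1) 1).foldl
    (fun freq i => freq.modify (PySem.Str.slice Text (some i) (some (i + k))) 0 (· + 1))
    freq

def FrequentWords (Text : String) (k : Int) : List String :=
  let words : List String := []
  let freq := pvFrequencyMap Text k
  match PySem.List.max? freq.values (fun v => v) with
  | none => []   -- Python's max() raises ValueError here; excluded by Pre_FrequentWords
  | some m =>
    let words := freq.keys.foldl
      (fun words key => if freq.getD key 0 == m then words ++ [key] else words) words
    PySem.List.sorted words (fun x => x) false

-- ===== PORT B =====
-- scan of the sorted k-mer list: measure each run of equal strings, keep heads of maximal runs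
-- fuel = rest.length makes the loop structurally recursive (each step consumes at least one element)
def pvScanGroups : Nat → List String → Int → List String → List String
  | _, [], _, winners => winners
  | 0, _ :: _, _, winners => winners   -- unreachable: fuel starts at the list's length
  | fuel + 1, head :: t, best, winners =>
    let r := (t.takeWhile (fun s => s == head)).length
    let run : Int := 1 + (r : Int)
    if run > best then pvScanGroups fuel (t.drop r) run [head]
    else if run == best then pvScanGroups fuel (t.drop r) best (winners ++ [head])
    else pvScanGroups fuel (t.drop r) best winners

-- sorted(...) is ported as List.mergeSort, Lean's stable stdlib sort (identical to
-- Python's stable sorted on this order; proved equal to PySem.List.sorted below)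
def FrequentWords_alt (Text : String) (k : Int) : List String :=
  let kmers := ((PySem.List.pyRange 0 (PySem.Str.len Text - k + 1) 1).map
      (fun i => PySem.Str.slice Text (some i) (some (i + k)))).mergeSort
      (fun a b => decide (a ≤ b))
  pvScanGroups kmers.length kmers 0 []

-- ===== PRECONDITION & SPEC =====
-- Pre_ excludes exactly k > len(Text): then there are no k-mers and A's max() raises ValueError.
def Pre_FrequentWords (Text : String) (k : Int) : Prop := k ≤ (Text.length : Int)
instance (Text : String) (k : Int) : Decidable (Pre_FrequentWords Text k) := by
  unfold Pre_FrequentWords; infer_instance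

def pvWitness_FrequentWords : String × Int := ("ATAT", 2)

def Spec_FrequentWords (Text : String) (k : Int) (out : List String) : Prop :=
  out = FrequentWords_alt Text k
instance (Text : String) (k : Int) (out : List String) : Decidable (Spec_FrequentWords Text k out) := by
  unfold Spec_FrequentWords; infer_instance

-- ===== CLAIM (what is proved, stated in full; the proofs are below) =====
def Claim_equal_FrequentWords : Prop := ∀ (Text : String) (k : Int), Dom_FrequentWords Text k →
  Pre_FrequentWords Text k → Spec_FrequentWords Text k (FrequentWords Text k)

-- ===== LEMMAS AND PROOFS =====

-- the list of all k-mers of Text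
def pvKmers (Text : String) (k : Int) : List String :=
  (PySem.List.pyRange 0 (PySem.Str.len Text - k + 1) 1).map
    (fun i => PySem.Str.slice Text (some i) (some (i + k)))

-- maximal multiplicity in a list of strings
def pvMC (l : List String) : Int :=
  l.foldl (fun acc s => max acc (l.count s : Int)) 0

theorem pvMC_nonneg (l : List String) : 0 ≤ pvMC l := by
  exact (PySem.List.le_foldl_max_int l (fun s => (l.count s : Int)) 0).1

theorem count_le_pvMC (l : List String) (s : String) (h : s ∈ l) :
    (l.count s : Int) ≤ pvMC l := by
  exact (PySem.List.le_foldl_max_int l (fun s => (l.count s : Int)) 0).2 s h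

theorem foldl_max_le {β : Type} (l : List β) (f : β → Int) (a z : Int)
    (ha : a ≤ z) (hf : ∀ x ∈ l, f x ≤ z) :
    l.foldl (fun acc x => max acc (f x)) a ≤ z := by
  induction l generalizing a with
  | nil => simpa using ha
  | cons x xs ih =>
    simp only [List.foldl_cons]
    exact ih _ (max_le ha (hf x (by simp))) (fun y hy => hf y (by simp [hy]))

theorem pvMC_le (l : List String) (z : Int) (hz : 0 ≤ z)
    (h : ∀ s ∈ l, (l.count s : Int) ≤ z) : pvMC l ≤ z :=
  foldl_max_le l _ 0 z hz h

-- dedup is a sublist (discard is a filter)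
theorem dedup_sublist (l : List String) : (PySem.List.dedup l).Sublist l := by
  rw [PySem.List.dedup_eq_ofList]
  induction l with
  | nil => simp [PySem.Set.ofList_nil]
  | cons x xs ih =>
    rw [PySem.Set.ofList_cons]
    exact List.Sublist.cons₂ x (List.filter_sublist.trans ih)

-- glue: dropping the takeWhile prefix is dropWhile
theorem drop_length_takeWhile {α : Type} (p : α → Bool) (l : List α) :
    l.drop (l.takeWhile p).length = l.dropWhile p := by
  induction l with
  | nil => rfl
  | cons x xs ih =>
    by_cases h : p x
    · simp [h, ih]
    · simp [h]

theorem dropWhile_head_not {α : Type} (p : α → Bool) (l : List α) (y : α) (ys : List α)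
    (h : l.dropWhile p = y :: ys) : p y = false := by
  induction l with
  | nil => simp at h
  | cons x xs ih =>
    rw [List.dropWhile_cons] at h
    split at h
    · exact ih h
    · next hpx =>
      cases h
      simpa using hpx

theorem discard_ofList_group (head : String) (rest' : List String) (hnm : head ∉ rest') :
    ∀ g : List String, (∀ x ∈ g, x = head) →
    PySem.Set.discard (PySem.Set.ofList (g ++ rest')) head = PySem.List.dedup rest' := by
  intro g hg
  induction g with
  | nil =>
    rw [List.nil_append, PySem.List.dedup_eq_ofList]
    show List.filter (fun y => !(y == head)) (PySem.Set.ofList rest') = PySem.Set.ofList rest'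
    apply List.filter_eq_self.mpr
    intro a ha
    have hmem : a ∈ rest' := (PySem.Set.mem_ofList rest' a).mp ha
    simp [show a ≠ head from fun h => hnm (h ▸ hmem)]
  | cons x g ih =>
    have hx : x = head := hg x (by simp)
    subst hx
    rw [List.cons_append, PySem.Set.ofList_cons]
    show List.filter (fun y => !(y == x)) (x :: PySem.Set.discard (PySem.Set.ofList (g ++ rest')) x) = _
    rw [List.filter_cons, if_neg (by simp)]
    show List.filter (fun y => !(y == x)) (List.filter (fun y => !(y == x)) (PySem.Set.ofList (g ++ rest'))) = _
    rw [List.filter_filter]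
    simp only [Bool.and_self]
    exact ih (fun y hy => hg y (by simp [hy]))

-- group decomposition facts for a sorted (Pairwise ≤) nonempty list
theorem group_facts (head : String) (t : List String) (hs : (head :: t).Pairwise (· ≤ ·)) :
    (∀ s ∈ t.drop (t.takeWhile (fun s => s == head)).length, head < s) ∧
    ((head :: t).count head = (t.takeWhile (fun s => s == head)).length + 1) ∧
    (∀ s ∈ t.drop (t.takeWhile (fun s => s == head)).length,
      (head :: t).count s = (t.drop (t.takeWhile (fun s => s == head)).length).count s) ∧
    (t.drop (t.takeWhile (fun s => s == head)).length).Pairwise (· ≤ ·) ∧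
    PySem.List.dedup (head :: t) =
      head :: PySem.List.dedup (t.drop (t.takeWhile (fun s => s == head)).length) := by
  set p : String → Bool := fun s => s == head with hp
  set tw := t.takeWhile p with htwdef
  set rest' := t.drop tw.length with hrdef
  have hdw : rest' = t.dropWhile p := drop_length_takeWhile p t
  have hsplit : tw ++ rest' = t := by rw [hdw, htwdef]; exact List.takeWhile_append_dropWhile
  have htw : ∀ s ∈ tw, s = head := by
    intro s hx
    have := List.mem_takeWhile_imp hx
    simpa [hp] using this
  have hle : ∀ s ∈ t, head ≤ s := (List.pairwise_cons.mp hs).1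
  have hpt : t.Pairwise (· ≤ ·) := (List.pairwise_cons.mp hs).2
  have hp' : rest'.Pairwise (· ≤ ·) := hpt.sublist (List.drop_sublist _ _)
  have hmem_rest' : ∀ s ∈ rest', s ∈ t := fun s hx => by
    rw [← hsplit]; exact List.mem_append_right _ hx
  have hlt : ∀ s ∈ rest', head < s := by
    cases hcase : rest' with
    | nil => simp
    | cons y ys =>
      have hyf : p y = false := dropWhile_head_not p t y ys (hdw ▸ hcase)
      have hyne : y ≠ head := by simpa [hp] using hyf
      have hymem : y ∈ t := hmem_rest' y (by rw [hcase]; simp)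
      have hhy : head < y := lt_of_le_of_ne (hle y hymem) (Ne.symm hyne)
      intro s hsmem
      rcases List.mem_cons.mp hsmem with h | h
      · exact h ▸ hhy
      · have : (y :: ys).Pairwise (· ≤ ·) := hcase ▸ hp'
        exact lt_of_lt_of_le hhy ((List.pairwise_cons.mp this).1 s h)
  have hnm : head ∉ rest' := fun h => lt_irrefl head (hlt head h)
  have hcount_tw_head : tw.count head = tw.length :=
    List.count_eq_length.mpr (fun b hb => (htw b hb).symm)
  refine ⟨hlt, ?_, ?_, hp', ?_⟩
  · rw [List.count_cons_self, ← hsplit, List.count_append, hcount_tw_head,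
        List.count_eq_zero.mpr hnm]
  · intro s hsmem
    have hsne : s ≠ head := fun h => lt_irrefl head (h ▸ hlt s hsmem)
    rw [List.count_cons_of_ne (Ne.symm hsne), ← hsplit, List.count_append]
    have : tw.count s = 0 := List.count_eq_zero.mpr (fun h => hsne (htw s h))
    rw [this, Nat.zero_add]
  · rw [PySem.List.dedup_eq_ofList, PySem.Set.ofList_cons, ← hsplit,
        discard_ofList_group head rest' hnm tw htw]

-- the closed form of the scan
theorem scan_spec (fuel : Nat) (rest : List String) (hf : rest.length ≤ fuel)
    (hs : rest.Pairwise (· ≤ ·)) :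
    ∀ (best : Int) (winners : List String), 0 ≤ best →
    pvScanGroups fuel rest best winners =
      (if best < pvMC rest then [] else winners) ++
      (PySem.List.dedup rest).filter (fun s => (rest.count s : Int) == max best (pvMC rest)) := by
  induction fuel generalizing rest with
  | zero =>
    have hnil : rest = [] := List.eq_nil_of_length_eq_zero (Nat.le_zero.mp hf)
    subst hnil
    intro best winners hb
    show winners = _
    rw [show pvMC ([] : List String) = 0 from rfl, if_neg (by omega),
        show PySem.List.dedup ([] : List String) = [] from rfl, List.filter_nil, List.append_nil]
  | succ fuel ih =>
    cases rest with
    | nil =>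
      intro best winners hb
      show winners = _
      rw [show pvMC ([] : List String) = 0 from rfl, if_neg (by omega),
          show PySem.List.dedup ([] : List String) = [] from rfl, List.filter_nil, List.append_nil]
    | cons head t =>
      intro best winners hb
      obtain ⟨hlt, hc1, hc2, hp', hded⟩ := group_facts head t hs
      set r : Nat := (t.takeWhile (fun s => s == head)).length with hrdef
      set rest' : List String := t.drop r with hrest
      have hflen : rest'.length ≤ fuel := by
        rw [hrest, List.length_drop]
        have h0 := hf
        rw [List.length_cons] at h0
        omega
      have hsplit : t.takeWhile (fun s => s == head) ++ rest' = t := by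
        rw [hrest, hrdef, drop_length_takeWhile]
        exact List.takeWhile_append_dropWhile
      have hmem_split : ∀ s ∈ head :: t, s = head ∨ s ∈ rest' := by
        intro s hmem
        rcases List.mem_cons.mp hmem with h | h
        · exact Or.inl h
        · rw [← hsplit] at h
          rcases List.mem_append.mp h with h | h
          · exact Or.inl (by simpa using List.mem_takeWhile_imp h)
          · exact Or.inr h
      have hcount_head : (((head :: t).count head : Nat) : Int) = 1 + (r : Int) := by
        rw [hc1]; push_cast; ring
      have hMC1 : pvMC (head :: t) = max (1 + (r : Int)) (pvMC rest') := by
        apply le_antisymm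
        · apply pvMC_le
          · have h1 : (0:Int) ≤ 1 + (r:Int) := by positivity
            exact le_trans h1 (le_max_left _ _)
          · intro s hsmem
            rcases hmem_split s hsmem with h | h
            · rw [h, hcount_head]
              exact le_max_left _ _
            · rw [hc2 s h]
              exact le_trans (count_le_pvMC rest' s h) (le_max_right _ _)
        · apply max_le
          · rw [← hcount_head]
            exact count_le_pvMC _ head (by simp)
          · apply pvMC_le rest' _ (pvMC_nonneg _)
            intro s hsmem
            rw [← hc2 s hsmem]
            exact count_le_pvMC _ s
              (List.mem_cons_of_mem head (by rw [← hsplit]; exact List.mem_append_right _ hsmem))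
      have hfilter : ∀ M : Int,
          List.filter (fun s => (((head :: t).count s : Int) == M)) (PySem.List.dedup rest')
            = List.filter (fun s => ((rest'.count s : Int) == M)) (PySem.List.dedup rest') := by
        intro M
        apply List.filter_congr
        intro a hamem
        rw [hc2 a ((PySem.List.mem_dedup rest' a).mp hamem)]
      rw [show pvScanGroups (fuel+1) (head :: t) best winners =
            (if 1 + (r:Int) > best then pvScanGroups fuel rest' (1 + (r:Int)) [head]
             else if (1 + (r:Int)) == best then pvScanGroups fuel rest' best (winners ++ [head])
             else pvScanGroups fuel rest' best winners) from rfl,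
          hded, hMC1, List.filter_cons, hcount_head, hfilter]
      by_cases h1 : 1 + (r:Int) > best
      · rw [if_pos h1, ih rest' hflen hp' (1 + (r:Int)) [head] (by positivity),
            show max best (max (1 + (r:Int)) (pvMC rest')) = max (1 + (r:Int)) (pvMC rest') from
              max_eq_right (le_trans (le_of_lt h1) (le_max_left _ _)),
            if_pos (show best < max (1 + (r:Int)) (pvMC rest') from
              lt_of_lt_of_le h1 (le_max_left _ _))]
        by_cases hcmp : pvMC rest' ≤ 1 + (r:Int)
        · rw [show max (1 + (r:Int)) (pvMC rest') = 1 + (r:Int) from max_eq_left hcmp,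
              if_neg (show ¬(1 + (r:Int) < pvMC rest') by omega),
              if_pos (show ((1 + (r:Int) : Int) == 1 + (r:Int)) = true from by simp)]
          rfl
        · rw [show max (1 + (r:Int)) (pvMC rest') = pvMC rest' from max_eq_right (by omega),
              if_pos (show 1 + (r:Int) < pvMC rest' by omega),
              if_neg (show ¬(((1 + (r:Int) : Int) == pvMC rest') = true) from by
                simp only [beq_iff_eq]; omega)]
      · have hle1 : 1 + (r:Int) ≤ best := by omega
        rw [if_neg h1,
            show max best (max (1 + (r:Int)) (pvMC rest')) = max best (pvMC rest') from by
              rw [← max_assoc, max_eq_left hle1]]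
        by_cases h2 : 1 + (r:Int) = best
        · rw [if_pos (show ((1 + (r:Int) : Int) == best) = true from by simp [h2]),
              ih rest' hflen hp' best (winners ++ [head]) hb]
          by_cases hcmp : pvMC rest' ≤ best
          · rw [show max best (pvMC rest') = best from max_eq_left hcmp,
                if_neg (show ¬(best < pvMC rest') by omega),
                if_neg (show ¬(best < max (1 + (r:Int)) (pvMC rest')) from by
                  rw [lt_max_iff]; omega),
                if_pos (show ((1 + (r:Int) : Int) == best) = true from by simp [h2])]
            rw [List.append_assoc]
            rfl
          · rw [show max best (pvMC rest') = pvMC rest' from max_eq_right (by omega),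
                if_pos (show best < pvMC rest' by omega),
                if_pos (show best < max (1 + (r:Int)) (pvMC rest') from
                  lt_max_iff.mpr (Or.inr (by omega))),
                if_neg (show ¬(((1 + (r:Int) : Int) == pvMC rest') = true) from by
                  simp only [beq_iff_eq]; omega)]
        · have hlt3 : 1 + (r:Int) < best := by omega
          rw [if_neg (show ¬(((1 + (r:Int) : Int) == best) = true) from by
                simp only [beq_iff_eq]; omega),
              ih rest' hflen hp' best winners hb]
          by_cases hcmp : pvMC rest' ≤ best
          · rw [show max best (pvMC rest') = best from max_eq_left hcmp,
                if_neg (show ¬(best < pvMC rest') by omega),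
                if_neg (show ¬(best < max (1 + (r:Int)) (pvMC rest')) from by
                  rw [lt_max_iff]; omega),
                if_neg (show ¬(((1 + (r:Int) : Int) == best) = true) from by
                  simp only [beq_iff_eq]; omega)]
          · rw [show max best (pvMC rest') = pvMC rest' from max_eq_right (by omega),
                if_pos (show best < pvMC rest' by omega),
                if_pos (show best < max (1 + (r:Int)) (pvMC rest') from
                  lt_max_iff.mpr (Or.inr (by omega))),
                if_neg (show ¬(((1 + (r:Int) : Int) == pvMC rest') = true) from by
                  simp only [beq_iff_eq]; omega)]

-- the two stable sorts agree
theorem mergeSort_eq_pysorted (xs : List String) :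
    xs.mergeSort (fun a b => decide (a ≤ b)) = PySem.List.sorted xs (fun x => x) false := by
  apply PySem.List.eq_of_perm_of_pairwise_le_of_injective (fun x : String => x)
    (fun a b h => h)
    ((List.mergeSort_perm xs _).trans (PySem.List.sorted_perm xs _ _).symm)
  · have h := List.pairwise_mergeSort (le := fun a b : String => decide (a ≤ b))
      (fun a b c hab hbc => by simp only [decide_eq_true_eq] at *; exact le_trans hab hbc)
      (fun a b => by simp [le_total]) xs
    exact h.imp (fun {a b} hab => by simpa using hab)
  · simpa using PySem.List.sorted_pairwise xs (fun x => x)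

-- characterization of A's frequency dict
theorem filter_not_contains_self (M : List String) :
    List.filter (fun y => !(PySem.Set.ofList M).contains y) (PySem.Set.ofList M) = [] := by
  apply List.filter_eq_nil_iff.mpr
  intro a ha
  rw [(PySem.Set.contains_iff (PySem.Set.ofList M) a).mpr ha]
  decide

theorem freqmap_keys (Text : String) (k : Int) :
    (pvFrequencyMap Text k).keys = PySem.List.dedup (pvKmers Text k) := by
  unfold pvFrequencyMap
  rw [PySem.Dict.keys_foldl_modify_key
        (key := fun i : Int => PySem.Str.slice Text (some i) (some (i + k)))
        (f := fun _ _ => (· + 1)),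
      PySem.Dict.keys_foldl_insert_key
        (key := fun i : Int => PySem.Str.slice Text (some i) (some (i + k)))
        (f := fun _ _ => 0),
      PySem.Dict.keys_empty, PySem.Set.update_nil_left,
      PySem.Set.update_eq_append_filter, filter_not_contains_self, List.append_nil,
      PySem.List.dedup_eq_ofList]
  rfl

theorem getD_insert_zero_fold (l : List String) (d : PySem.Dict String Int)
    (h : ∀ s, d.getD s 0 = 0) :
    ∀ s, (l.foldl (fun d x => d.insert x 0) d).getD s 0 = 0 := by
  induction l generalizing d with
  | nil => exact h
  | cons x xs ih =>
    intro s
    refine ih _ (fun s => ?_) s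
    rw [PySem.Dict.getD_insert]
    split
    · rfl
    · exact h s

theorem freqmap_getD (Text : String) (k : Int) (s : String) :
    (pvFrequencyMap Text k).getD s 0 = ((pvKmers Text k).count s : Int) := by
  unfold pvFrequencyMap
  rw [← List.foldl_map (f := fun i : Int => PySem.Str.slice Text (some i) (some (i + k)))
        (g := fun (d : PySem.Dict String Int) s => d.modify s 0 (· + 1)),
      ← List.foldl_map (f := fun i : Int => PySem.Str.slice Text (some i) (some (i + k)))
        (g := fun (d : PySem.Dict String Int) s => d.insert s 0),
      PySem.Dict.getD_foldl_modify_add_one,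
      getD_insert_zero_fold _ _ (fun s => PySem.Dict.getD_empty s 0) s, zero_add]
  rfl

-- ===== VERDICT (by name: the statement is the Claim_ definition above) =====
theorem FrequentWords_spec : Claim_equal_FrequentWords := by
  intro Text k _ hpre
  unfold Spec_FrequentWords
  have hpre' : k ≤ PySem.Str.len Text := by
    rw [PySem.Str.len_eq, String.length_toList] at *
    exact hpre
  have hLne : pvKmers Text k ≠ [] := by
    unfold pvKmers
    intro h
    have h2 := congrArg List.length h
    simp only [List.length_map, PySem.List.length_pyRange_one, List.length_nil] at h2
    omega
  set L := pvKmers Text k with hLdef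
  set S := PySem.List.sorted L (fun x => x) false with hSdef
  have hSperm : S.Perm L := PySem.List.sorted_perm L _ _
  have hScount : ∀ s, S.count s = L.count s := fun s => hSperm.count_eq s
  have hSmem : ∀ s : String, s ∈ S ↔ s ∈ L := fun s => hSperm.mem_iff
  set freq := pvFrequencyMap Text k with hfreq
  have hkeys : freq.keys = PySem.List.dedup L := freqmap_keys Text k
  have hnod : freq.keys.Nodup := by rw [hkeys]; exact PySem.List.nodup_dedup L
  have hvals : freq.values = (PySem.List.dedup L).map (fun s => (L.count s : Int)) := by
    rw [PySem.Dict.values_eq_map_keys freq hnod 0, hkeys]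
    exact List.map_congr_left (fun s _ => freqmap_getD Text k s)
  have hvne : freq.values ≠ [] := by
    rw [hvals]
    simp only [ne_eq, List.map_eq_nil_iff]
    intro h
    rcases List.exists_mem_of_ne_nil L hLne with ⟨a, ha⟩
    have hmem : a ∈ PySem.List.dedup L := (PySem.List.mem_dedup L a).mpr ha
    rw [h] at hmem
    exact absurd hmem (List.not_mem_nil)
  obtain ⟨m, hm⟩ : ∃ m, PySem.List.max? freq.values (fun v => v) = some m := by
    cases hmx : PySem.List.max? freq.values (fun v => v) with
    | none => exact absurd ((PySem.List.max?_eq_none_iff _ _).mp hmx) hvne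
    | some m => exact ⟨m, rfl⟩
  have hm_max : ∀ y ∈ freq.values, y ≤ m := fun y hy => PySem.List.max?_isMax hm y hy
  obtain ⟨s0, hs0d, hs0⟩ : ∃ s0 ∈ PySem.List.dedup L, (L.count s0 : Int) = m := by
    rcases List.mem_map.mp (hvals ▸ PySem.List.max?_mem hm) with ⟨s0, h1, h2⟩
    exact ⟨s0, h1, h2⟩
  have hm0 : 0 ≤ m := hs0 ▸ Int.natCast_nonneg _
  have hcount_le : ∀ s ∈ L, (L.count s : Int) ≤ m := by
    intro s hsL
    exact hm_max _ (by rw [hvals]; exact List.mem_map_of_mem ((PySem.List.mem_dedup L s).mpr hsL))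
  have hMC : pvMC S = m := by
    apply le_antisymm
    · apply pvMC_le _ _ hm0
      intro s hsS
      rw [hScount s]
      exact hcount_le s ((hSmem s).mp hsS)
    · have hs0S : s0 ∈ S := (hSmem s0).mpr ((PySem.List.mem_dedup L s0).mp hs0d)
      have h3 := count_le_pvMC S s0 hs0S
      rw [hScount s0, hs0] at h3
      exact h3
  have hA : FrequentWords Text k =
      PySem.List.sorted ((PySem.List.dedup L).filter (fun s => freq.getD s 0 == m)) (fun x => x) false := by
    show (match PySem.List.max? freq.values (fun v => v) with
      | none => ([] : List String)
      | some m => PySem.List.sorted (freq.keys.foldl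
          (fun words key => if freq.getD key 0 == m then words ++ [key] else words) [])
          (fun x => x) false) = _
    rw [hm]
    show PySem.List.sorted (freq.keys.foldl
        (fun words key => if freq.getD key 0 == m then words ++ [key] else words) [])
        (fun x => x) false = _
    rw [PySem.List.foldl_append_if_eq_filter (fun key => freq.getD key 0 == m) freq.keys [],
        hkeys]
    rfl
  have hB : FrequentWords_alt Text k =
      (PySem.List.dedup S).filter (fun s => (S.count s : Int) == max 0 (pvMC S)) := by
    show pvScanGroups (L.mergeSort (fun a b => decide (a ≤ b))).length
        (L.mergeSort (fun a b => decide (a ≤ b))) 0 [] = _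
    rw [mergeSort_eq_pysorted L, ← hSdef]
    rw [scan_spec S.length S le_rfl (by simpa using PySem.List.sorted_pairwise L (fun x => x))
        0 [] le_rfl]
    simp
  rw [hA, hB, hMC, max_eq_right hm0]
  have hnodB : ((PySem.List.dedup S).filter (fun s => (S.count s : Int) == m)).Nodup :=
    (PySem.List.nodup_dedup S).filter _
  have hnodA : ((PySem.List.dedup L).filter (fun s => freq.getD s 0 == m)).Nodup :=
    (PySem.List.nodup_dedup L).filter _
  apply PySem.List.sorted_eq_of_perm_of_pairwise_lt
  · apply (List.perm_ext_iff_of_nodup hnodB hnodA).mpr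
    intro a
    simp only [List.mem_filter, PySem.List.mem_dedup, hSmem a, hScount a, beq_iff_eq,
      hfreq, freqmap_getD, ← hLdef]
  · have h1 : (PySem.List.dedup S).Pairwise (· ≤ ·) :=
      List.Pairwise.sublist (dedup_sublist S)
        (by simpa using PySem.List.sorted_pairwise L (fun x => x))
    have h2 : ((PySem.List.dedup S).filter (fun s => (S.count s : Int) == m)).Pairwise (· ≤ ·) :=
      List.Pairwise.sublist List.filter_sublist h1
    exact (h2.and hnodB).imp (fun h => lt_of_le_of_ne h.1 h.2)
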